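-- pv_equiv track=rewrite | github.com/praerie/python_labs | tuple_return.py | largest_second_element_tuples
-- ===== SOURCE A (Python) =====
-- def largest_second_element_tuples(tuples_list):
--     # return an empty list if the input list is empty
--     if not tuples_list:
--         return []
--
--     # initialize max_value with the second element of the first tuple
--     max_value = tuples_list[0][1]
--     # initialize result list with the first tuple
--     result = [tuples_list[0]]
--
--     # iterate through the rest of the list
--     for tup in tuples_list[1:]:
--         # if the current tuple's second element is greater than max_value,
--         # update max_value and start a new result list with this tuple
--         if tup[1] > max_value:
--             max_value = tup[1]
--             result = [tup]
--         # if the current tuple's second element equals max_value,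
--         # add it to the result list
--         elif tup[1] == max_value:
--             result.append(tup)
--
--     # return all tuples with the highest second element
--     return result
-- ===== SOURCE B (Python) =====
-- def largest_second_element_tuples(tuples_list):
--     if not tuples_list:
--         return []
--     m = max(t[1] for t in tuples_list)
--     return [t for t in tuples_list if t[1] == m]
-- ===== Notes on version B (the rewrite author's own statement) =====
-- stated objective: simpler
-- what changed: Replaced the fused running-max-with-reset accumulator scan by two plain passes: compute the maximum second element, then filter the tuples equal to it.
import Mathlib
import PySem

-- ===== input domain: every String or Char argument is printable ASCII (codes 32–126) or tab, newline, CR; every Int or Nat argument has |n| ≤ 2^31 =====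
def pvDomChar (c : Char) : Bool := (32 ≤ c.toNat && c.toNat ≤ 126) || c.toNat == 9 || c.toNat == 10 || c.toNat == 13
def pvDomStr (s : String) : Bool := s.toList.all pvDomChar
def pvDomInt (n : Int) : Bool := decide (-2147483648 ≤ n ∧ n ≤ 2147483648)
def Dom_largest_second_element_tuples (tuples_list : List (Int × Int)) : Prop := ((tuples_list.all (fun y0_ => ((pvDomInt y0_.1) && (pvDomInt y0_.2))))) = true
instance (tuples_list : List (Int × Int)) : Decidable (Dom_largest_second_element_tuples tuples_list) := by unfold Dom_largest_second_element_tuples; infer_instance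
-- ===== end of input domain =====

-- B: two plain passes (max of second elements, then filter) instead of A's fused running-max-with-reset scan; simpler.
-- ===== PORT A =====
-- A's for-loop over tuples_list[1:] with state (max_value, result); branches in source order.
def pvLoopA : List (Int × Int) → Int → List (Int × Int) → List (Int × Int)
  | [], _, result => result
  | tup :: rest, max_value, result =>
    if tup.2 > max_value then pvLoopA rest tup.2 [tup]
    else if tup.2 == max_value then pvLoopA rest max_value (result ++ [tup])
    else pvLoopA rest max_value result

def largest_second_element_tuples (tuples_list : List (Int × Int)) : List (Int × Int) :=
  match tuples_list with
  | [] => []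
  | t0 :: rest => pvLoopA rest t0.2 [t0]

-- ===== PORT B =====
def largest_second_element_tuples_alt (tuples_list : List (Int × Int)) : List (Int × Int) :=
  match tuples_list with
  | [] => []
  | t0 :: rest =>
    let m : Int := rest.foldl (fun acc t => max acc t.2) t0.2
    tuples_list.filter (fun t => t.2 == m)

-- ===== PRECONDITION & SPEC =====
def Spec_largest_second_element_tuples (tuples_list : List (Int × Int)) (out : List (Int × Int)) : Prop := out = largest_second_element_tuples_alt tuples_list
instance (tuples_list : List (Int × Int)) (out : List (Int × Int)) : Decidable (Spec_largest_second_element_tuples tuples_list out) := by unfold Spec_largest_second_element_tuples; infer_instance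

-- ===== CLAIM (what is proved, stated in full; the proofs are below) =====
def Claim_equal_largest_second_element_tuples : Prop := ∀ (tuples_list : List (Int × Int)), Dom_largest_second_element_tuples tuples_list → Spec_largest_second_element_tuples tuples_list (largest_second_element_tuples tuples_list)

-- ===== LEMMAS AND PROOFS =====

-- ===== VERDICT (by name: the statement is the Claim_ definition above) =====
lemma pv_le_foldl_max (l : List (Int × Int)) (m : Int) :
    m ≤ l.foldl (fun acc t => max acc t.2) m := by
  induction l generalizing m with
  | nil => exact le_refl m
  | cons t ts ih =>
    simp only [List.foldl_cons]
    exact le_trans (le_max_left m t.2) (ih (max m t.2))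

lemma pvLoopA_eq (l : List (Int × Int)) (m : Int) (res : List (Int × Int)) :
    pvLoopA l m res =
      (if m = l.foldl (fun acc t => max acc t.2) m then res else [])
        ++ l.filter (fun t => t.2 == l.foldl (fun acc t => max acc t.2) m) := by
  induction l generalizing m res with
  | nil => simp [pvLoopA]
  | cons t ts ih =>
    simp only [pvLoopA, List.foldl_cons, List.filter_cons]
    have hub := pv_le_foldl_max ts (max m t.2)
    by_cases h1 : t.2 > m
    · have hmax : max m t.2 = t.2 := max_eq_right (le_of_lt h1)
      simp only [hmax] at hub ⊢
      have hm : ¬ (m = ts.foldl (fun acc t => max acc t.2) t.2) := by omega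
      rw [ih t.2 [t]]
      simp only [if_neg hm, List.nil_append]
      simp only [beq_iff_eq]
      split_ifs with h3 <;> simp
    · simp only [if_neg h1]
      have hmax : max m t.2 = m := max_eq_left (by omega)
      simp only [hmax] at hub ⊢
      by_cases h2 : t.2 == m
      · have h2' : t.2 = m := by simpa using h2
        rw [if_pos h2, ih m (res ++ [t])]
        by_cases hm : m = ts.foldl (fun acc t => max acc t.2) m
        · simp only [← hm, h2', beq_self_eq_true, if_pos]
          simp
        · have : ¬ (t.2 == ts.foldl (fun acc t => max acc t.2) m) = true := by
            simp [beq_iff_eq]; omega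
          simp [hm, this]
      · rw [if_neg (by simpa using h2), ih m res]
        have : ¬ (t.2 == ts.foldl (fun acc t => max acc t.2) m) = true := by
          simp only [beq_iff_eq] at h2 ⊢; omega
        simp [this]

theorem largest_second_element_tuples_spec : Claim_equal_largest_second_element_tuples := by
  intro l _
  unfold Spec_largest_second_element_tuples largest_second_element_tuples largest_second_element_tuples_alt
  match l with
  | [] => rfl
  | t0 :: rest =>
    simp only [pvLoopA_eq, List.filter_cons]
    by_cases h : t0.2 = rest.foldl (fun acc t => max acc t.2) t0.2
    · simp [← h]
    · simp [h, beq_iff_eq]
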